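-- pv_equiv track=rewrite | github.com/ivasilyev/MiniLightXmasTree | neo_rings.py | _generate_ranges
-- ===== SOURCE A (Python) =====
-- def _generate_ranges(rings: tuple):
--     first, last = (0, 0)
--     reverse = False
--     out = []
--     for ring_length in rings:
--         last += ring_length
--         out.append(tuple(sorted(list(range(first, last)), reverse=reverse)))
--         first += ring_length
--         reverse = not reverse
--     return out
-- ===== SOURCE B (Python) =====
-- def _generate_ranges(rings: tuple):
--     # Phase 1: cumulative boundary table (prefix sums).
--     bounds = [0]
--     for ring_length in rings:
--         bounds.append(bounds[-1] + ring_length)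
--     # Phase 2: map each block to its ascending or descending range by parity.
--     return [tuple(range(a, b)) if i % 2 == 0 else tuple(range(b - 1, a - 1, -1))
--             for i, (a, b) in enumerate(zip(bounds, bounds[1:]))]
-- ===== Notes on version B (the rewrite author's own statement) =====
-- stated objective: alternative
-- what changed: Replaces the single stateful loop threading first/last/reverse and calling sorted(...) per ring with a two-phase decomposition: first a prefix-sum boundary table, then a parity-driven mapping pass emitting the ascending or descending range directly (no sorting).
import Mathlib
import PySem

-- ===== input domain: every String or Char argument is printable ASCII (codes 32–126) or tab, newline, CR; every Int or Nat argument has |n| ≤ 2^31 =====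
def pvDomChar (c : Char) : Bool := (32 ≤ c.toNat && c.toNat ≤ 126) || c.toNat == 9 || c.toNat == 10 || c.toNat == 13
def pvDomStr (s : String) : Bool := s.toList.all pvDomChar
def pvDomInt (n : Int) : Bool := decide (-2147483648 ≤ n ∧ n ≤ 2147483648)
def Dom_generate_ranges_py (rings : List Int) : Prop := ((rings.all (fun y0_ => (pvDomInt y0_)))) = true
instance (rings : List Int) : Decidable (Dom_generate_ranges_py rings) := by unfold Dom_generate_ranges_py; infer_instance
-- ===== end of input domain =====

-- B replaces A's single stateful loop (threading first/last/reverse and sorting each block)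
-- by a two-phase decomposition: a prefix-sum boundary table, then a parity-driven mapping pass.

-- ===== PORT A =====
def generate_ranges_py (rings : List Int) : List (List Int) :=
  (rings.foldl
    (fun (st : Int × Int × Bool × List (List Int)) ring_length =>
      let first := st.1
      let last := st.2.1 + ring_length
      let rev := st.2.2.1
      let out := st.2.2.2 ++ [PySem.List.sorted (PySem.List.pyRange first last 1) (fun x => x) rev]
      (first + ring_length, last, !rev, out))
    (0, 0, false, [])).2.2.2

-- ===== PORT B =====
def generate_ranges_py_alt (rings : List Int) : List (List Int) :=
  let bounds := rings.foldl
    (fun (acc : List Int) ring_length => acc ++ [PySem.List.pyGetD acc (-1) 0 + ring_length]) [0]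
  (PySem.List.enumerate (bounds.zip (bounds.drop 1)) 0).map
    (fun p => if p.1 % 2 == 0 then PySem.List.pyRange p.2.1 p.2.2 1
              else PySem.List.pyRange (p.2.2 - 1) (p.2.1 - 1) (-1))

-- ===== PRECONDITION & SPEC =====
def Spec_generate_ranges_py (rings : List Int) (out : List (List Int)) : Prop := out = generate_ranges_py_alt rings
instance (rings : List Int) (out : List (List Int)) : Decidable (Spec_generate_ranges_py rings out) := by unfold Spec_generate_ranges_py; infer_instance

-- ===== CLAIM (what is proved, stated in full; the proofs are below) =====
def Claim_equal_generate_ranges_py : Prop := ∀ (rings : List Int), Dom_generate_ranges_py rings → Spec_generate_ranges_py rings (generate_ranges_py rings)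

-- ===== LEMMAS AND PROOFS =====

/-- Tail of the prefix-sum boundary table starting after running total `t`. -/
def pvTailSums (t : Int) : List Int → List Int
  | [] => []
  | r :: rs => (t + r) :: pvTailSums (t + r) rs

/-- Common specification of the block list: one ascending/descending range per ring. -/
def pvBuild (f : Int) (rev : Bool) : List Int → List (List Int)
  | [] => []
  | r :: rs =>
      (if rev then PySem.List.pyRange (f + r - 1) (f - 1) (-1) else PySem.List.pyRange f (f + r) 1)
        :: pvBuild (f + r) (!rev) rs

theorem pvSortedAsc (a b : Int) :
    PySem.List.sorted (PySem.List.pyRange a b 1) (fun x => x) false = PySem.List.pyRange a b 1 :=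
  PySem.List.sorted_eq_self_of_pairwise _ _
    ((PySem.List.pairwise_lt_pyRange_one a b).imp (fun h => le_of_lt h))

theorem pvSortedDesc (a b : Int) :
    PySem.List.sorted (PySem.List.pyRange a b 1) (fun x => x) true
      = PySem.List.pyRange (b - 1) (a - 1) (-1) := by
  apply PySem.List.sorted_rev_eq_of_perm_of_pairwise_gt
  · rw [PySem.List.pyRange_neg_one_eq_reverse]
    have h1 : a - 1 + 1 = a := by ring
    have h2 : b - 1 + 1 = b := by ring
    rw [h1, h2]
    exact (PySem.List.pyRange a b 1).reverse_perm
  · rw [PySem.List.pyRange_neg_one_eq_reverse]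
    have h1 : a - 1 + 1 = a := by ring
    have h2 : b - 1 + 1 = b := by ring
    rw [h1, h2, List.pairwise_reverse]
    exact PySem.List.pairwise_lt_pyRange_one a b

/-- A's loop, unrolled from any state whose `first` and `last` agree. -/
theorem pvALoop (rings : List Int) : ∀ (f : Int) (rev : Bool) (out : List (List Int)),
    (rings.foldl
      (fun (st : Int × Int × Bool × List (List Int)) ring_length =>
        let first := st.1
        let last := st.2.1 + ring_length
        let rev := st.2.2.1
        let out := st.2.2.2 ++ [PySem.List.sorted (PySem.List.pyRange first last 1) (fun x => x) rev]
        (first + ring_length, last, !rev, out))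
      (f, f, rev, out)).2.2.2 = out ++ pvBuild f rev rings := by
  induction rings with
  | nil => intro f rev out; simp [pvBuild]
  | cons r rs ih =>
      intro f rev out
      simp only [List.foldl_cons, pvBuild]
      rw [ih (f + r) (!rev) (out ++ [PySem.List.sorted (PySem.List.pyRange f (f + r) 1) (fun x => x) rev])]
      cases rev <;> simp [pvSortedAsc, pvSortedDesc]

/-- B's first pass builds the boundary table. -/
theorem pvBoundsLoop (rings : List Int) : ∀ (ys : List Int) (t : Int),
    rings.foldl
      (fun (acc : List Int) ring_length => acc ++ [PySem.List.pyGetD acc (-1) 0 + ring_length])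
      (ys ++ [t]) = ys ++ t :: pvTailSums t rings := by
  induction rings with
  | nil => intro ys t; simp [pvTailSums]
  | cons r rs ih =>
      intro ys t
      simp only [List.foldl_cons, PySem.List.pyGetD_neg_one_append_singleton, pvTailSums]
      have := ih (ys ++ [t]) (t + r)
      simpa using this

theorem pvParityFlip (s : Int) : ((s + 1) % 2 == 0) = !(s % 2 == 0) := by
  have h2 : s % 2 = 0 ∨ s % 2 = 1 := by omega
  rcases h2 with h | h <;>
    simp [h, show (s+1) % 2 = 1 - s % 2 by omega]

/-- B's second pass over consecutive boundary pairs produces the block spec. -/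
theorem pvBLoop (rings : List Int) : ∀ (t s : Int),
    (PySem.List.enumerate ((t :: pvTailSums t rings).zip (pvTailSums t rings)) s).map
      (fun p => if p.1 % 2 == 0 then PySem.List.pyRange p.2.1 p.2.2 1
                else PySem.List.pyRange (p.2.2 - 1) (p.2.1 - 1) (-1))
      = pvBuild t (!(s % 2 == 0)) rings := by
  induction rings with
  | nil => intro t s; simp [pvTailSums, pvBuild]
  | cons r rs ih =>
      intro t s
      simp only [pvTailSums, List.zip_cons_cons, PySem.List.enumerate_cons, List.map_cons, pvBuild]
      rw [ih (t + r) (s + 1), pvParityFlip]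
      cases h : (s % 2 == 0) <;> simp

-- ===== VERDICT (by name: the statement is the Claim_ definition above) =====
theorem generate_ranges_py_spec : Claim_equal_generate_ranges_py := by
  intro rings _
  show generate_ranges_py rings = generate_ranges_py_alt rings
  unfold generate_ranges_py generate_ranges_py_alt
  rw [pvALoop rings 0 false []]
  have hb := pvBoundsLoop rings [] 0
  simp only [List.nil_append] at hb
  simp only [hb, List.drop_one, List.tail_cons]
  rw [pvBLoop rings 0 0]
  simp
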